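-- pv_equiv track=rewrite | github.com/mbaddar1/coding | meta2025/actual_questions/min_sum_variant.py | find_min_travel_distance
-- ===== SOURCE A (Python) =====
-- from typing import List
--
-- def find_min_travel_distance(D: List[int], R: List[int]) -> float:
--     n = len(D)
--
--     min_R = [-1]*n
--     min_R[n-1] = R[n-1]
--     for i in range(n-2,-1,-1):
--         min_R[i] = min(min_R[i+1],R[i])
--     tot_min = D[0]+min_R[0]
--     for i in range(1,n):
--         tot_min = min(tot_min,D[i]+min_R[i])
--     return tot_min
-- ===== SOURCE B (Python) =====
-- from typing import List
--
-- def find_min_travel_distance(D: List[int], R: List[int]) -> float: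
--     # dual identity: min over i<=j of D[i]+R[j] = min over j of (prefix-min of D up to j) + R[j]
--     n = len(D)
--     pref = D[0]
--     best = pref + R[0]
--     for j in range(1, n):
--         pref = min(pref, D[j])
--         best = min(best, pref + R[j])
--     return best
-- ===== Notes on version B (the rewrite author's own statement) =====
-- stated objective: alternative
-- what changed: B uses the dual identity min_{i<=j}(D[i]+R[j]) = min_j (prefix-min of D[0..j] + R[j]): one forward pass keeping a running prefix-minimum of D, instead of A's backward suffix-min array over R followed by a second forward minimization pass.
import Mathlib
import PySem

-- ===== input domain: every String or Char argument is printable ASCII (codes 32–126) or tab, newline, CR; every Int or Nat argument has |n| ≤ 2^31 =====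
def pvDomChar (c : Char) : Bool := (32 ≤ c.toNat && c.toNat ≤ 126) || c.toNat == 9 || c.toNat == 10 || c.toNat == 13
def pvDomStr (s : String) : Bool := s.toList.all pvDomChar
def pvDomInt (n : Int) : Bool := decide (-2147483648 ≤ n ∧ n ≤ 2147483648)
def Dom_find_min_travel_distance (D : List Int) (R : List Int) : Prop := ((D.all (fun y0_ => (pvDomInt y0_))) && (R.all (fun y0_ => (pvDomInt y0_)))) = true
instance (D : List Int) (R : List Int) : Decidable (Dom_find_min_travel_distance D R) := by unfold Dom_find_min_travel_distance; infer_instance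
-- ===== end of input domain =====

-- B computes the same value by the dual identity min_{i≤j}(D[i]+R[j]) = min_j (prefix-min
-- of D[0..j] + R[j]): one forward pass with a running prefix-minimum of D, instead of
-- A's backward suffix-min array over R followed by a second minimization pass.

-- ===== PORT A =====
def find_min_travel_distance (D : List Int) (R : List Int) : Int :=
  let n := D.length
  let min_R := List.replicate n (-1 : Int)
  let min_R := PySem.List.pySetD min_R ((n : Int) - 1) (PySem.List.pyGetD R ((n : Int) - 1) 0)
  let min_R := (PySem.List.pyRange ((n : Int) - 2) (-1) (-1)).foldl
      (fun m i => PySem.List.pySetD m i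
        (min (PySem.List.pyGetD m (i + 1) 0) (PySem.List.pyGetD R i 0))) min_R
  let tot_min := PySem.List.pyGetD D 0 0 + PySem.List.pyGetD min_R 0 0
  (PySem.List.pyRange 1 (n : Int) 1).foldl
      (fun t i => min t (PySem.List.pyGetD D i 0 + PySem.List.pyGetD min_R i 0)) tot_min

-- ===== PORT B =====
def find_min_travel_distance_alt (D : List Int) (R : List Int) : Int :=
  let n := D.length
  let pref := PySem.List.pyGetD D 0 0
  let best := pref + PySem.List.pyGetD R 0 0
  let s := (PySem.List.pyRange 1 (n : Int) 1).foldl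
      (fun (s : Int × Int) j =>
        let p := min s.1 (PySem.List.pyGetD D j 0)
        (p, min s.2 (p + PySem.List.pyGetD R j 0))) (pref, best)
  s.2

-- ===== PRECONDITION & SPEC =====
-- Pre_ excludes exactly the inputs where the Python A raises IndexError:
-- D = [] (assignment min_R[-1] on an empty list) or len(R) < len(D) (reading R[n-1] or R[i]).
def Pre_find_min_travel_distance (D : List Int) (R : List Int) : Prop :=
  D ≠ [] ∧ D.length ≤ R.length
instance (D : List Int) (R : List Int) : Decidable (Pre_find_min_travel_distance D R) := by
  unfold Pre_find_min_travel_distance; infer_instance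

def pvWitness_find_min_travel_distance : List Int × List Int := ([3, 1, 4], [5, 2, 6])

def Spec_find_min_travel_distance (D : List Int) (R : List Int) (out : Int) : Prop :=
  out = find_min_travel_distance_alt D R
instance (D : List Int) (R : List Int) (out : Int) : Decidable (Spec_find_min_travel_distance D R out) := by
  unfold Spec_find_min_travel_distance; infer_instance

-- ===== CLAIM (what is proved, stated in full; the proofs are below) =====
def Claim_equal_find_min_travel_distance : Prop := ∀ (D : List Int) (R : List Int), Dom_find_min_travel_distance D R → Pre_find_min_travel_distance D R → Spec_find_min_travel_distance D R (find_min_travel_distance D R)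

-- ===== LEMMAS AND PROOFS =====

-- suffix minimum of R on indices i..n-1 (as A reads it, via getD with default 0)
def sufMin (R : List Int) (n : Nat) (i : Nat) : Int :=
  if _h : i + 1 < n then min (sufMin R n (i + 1)) (R.getD i 0) else R.getD i 0
termination_by n - i

-- ascending running minimum of D[i] + sufMin i over i = 0..k  (A's second pass)
def ascMin (D R : List Int) (n : Nat) : Nat → Int
  | 0 => D.getD 0 0 + sufMin R n 0
  | k + 1 => min (ascMin D R n k) (D.getD (k + 1) 0 + sufMin R n (k + 1))

-- prefix minimum of D on indices 0..k  (B's running accumulator)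
def preMin (D : List Int) : Nat → Int
  | 0 => D.getD 0 0
  | k + 1 => min (preMin D k) (D.getD (k + 1) 0)

-- running minimum of preMin j + R[j] over j = 0..k  (B's best)
def bMin (D R : List Int) : Nat → Int
  | 0 => D.getD 0 0 + R.getD 0 0
  | k + 1 => min (bMin D R k) (preMin D (k + 1) + R.getD (k + 1) 0)

theorem sufMin_last (R : List Int) (n : Nat) : sufMin R n (n - 1) = R.getD (n - 1) 0 := by
  rw [sufMin]
  simp only [dif_neg (by omega : ¬ (n - 1 + 1 < n))]

theorem sufMin_step (R : List Int) (n i : Nat) (h : i + 1 < n) :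
    sufMin R n i = min (sufMin R n (i + 1)) (R.getD i 0) := by
  rw [sufMin]; simp [h]

-- A's first loop fills the array with suffix minima
theorem fillA (R : List Int) (n : Nat) :
    ∀ (a : Nat) (m : List Int), m.length = n → a + 1 < n →
    (∀ j, a < j → j < n → m.getD j 0 = sufMin R n j) →
    let res := (PySem.List.pyRange ((a : Int)) (-1) (-1)).foldl
      (fun m i => PySem.List.pySetD m i
        (min (PySem.List.pyGetD m (i + 1) 0) (PySem.List.pyGetD R i 0))) m
    res.length = n ∧ (∀ j, j < n → res.getD j 0 = sufMin R n j) := by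
  intro a
  induction a with
  | zero =>
    intro m hlen ha hinv
    rw [PySem.List.pyRange_neg_one_cons (by norm_num), PySem.List.pyRange_neg_one_eq_nil (by norm_num)]
    simp only [List.foldl_cons, List.foldl_nil, Nat.cast_zero]
    rw [PySem.List.pySetD_of_nonneg (i := 0) m _ (by norm_num),
      PySem.List.pyGetD_of_nonneg (i := 0 + 1) m 0 (by norm_num),
      PySem.List.pyGetD_of_nonneg (i := 0) R 0 (by norm_num)]
    norm_num
    constructor
    · simpa using hlen
    · intro j hj
      rcases Nat.eq_zero_or_pos j with hj0 | hj0
      · subst hj0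
        rw [List.getElem?_set_self (by omega), Option.getD_some]
        rw [sufMin_step R n 0 ha, ← hinv 1 (by omega) ha]
        simp [List.getD_eq_getElem?_getD]
      · rw [List.getElem?_set_ne (by omega), ← List.getD_eq_getElem?_getD]
        exact hinv j (by omega) hj
  | succ a ih =>
    intro m hlen ha hinv
    rw [PySem.List.pyRange_neg_one_cons (by push_cast; omega)]
    simp only [List.foldl_cons]
    have hc : ((a + 1 : Nat) : Int) - 1 = (a : Int) := by push_cast; ring
    have hi1 : ((a + 1 : Nat) : Int) + 1 = ((a + 2 : Nat) : Int) := by push_cast; ring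
    rw [hi1]
    simp only [PySem.List.pySetD_natCast, PySem.List.pyGetD_natCast, hc]
    have hval : min (m.getD (a + 2) 0) (R.getD (a + 1) 0) = sufMin R n (a + 1) := by
      rw [hinv (a + 2) (by omega) (by omega), ← sufMin_step R n (a + 1) (by omega)]
    rw [hval]
    apply ih
    · simpa using hlen
    · omega
    · intro j hj hjn
      rcases Nat.eq_or_lt_of_le hj with hje | hjl
      · rw [← hje, List.getD_eq_getElem?_getD, List.getElem?_set_self (by omega), Option.getD_some]
      · rw [List.getD_eq_getElem?_getD, List.getElem?_set_ne (by omega), ← List.getD_eq_getElem?_getD]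
        exact hinv j (by omega) hjn

-- A's second loop computes the ascending running minimum
theorem passA (D R M : List Int) (n : Nat)
    (hM : ∀ j, j < n → M.getD j 0 = sufMin R n j) :
    ∀ k, k < n →
    (PySem.List.pyRange 1 ((k : Int) + 1) 1).foldl
      (fun t i => min t (PySem.List.pyGetD D i 0 + PySem.List.pyGetD M i 0))
      (PySem.List.pyGetD D 0 0 + PySem.List.pyGetD M 0 0) = ascMin D R n k := by
  intro k
  induction k with
  | zero =>
    intro hk
    rw [PySem.List.pyRange_one_eq_nil (by norm_num)]
    simp only [List.foldl_nil, ascMin, PySem.List.pyGetD_zero]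
    rw [hM 0 hk]
  | succ k ih =>
    intro hk
    rw [PySem.List.pyRange_one_succ_right (show (1 : Int) ≤ ((k + 1 : Nat) : Int) by push_cast; omega), List.foldl_append]
    have hcast : ((k + 1 : Nat) : Int) = (k : Int) + 1 := by push_cast; ring
    rw [hcast, ih (by omega)]
    simp only [List.foldl_cons, List.foldl_nil, ascMin, ← hcast, PySem.List.pyGetD_natCast]
    rw [hM (k + 1) hk]

-- B's loop: the pair state is (prefix minimum, running best)
theorem passB (D R : List Int) :
    ∀ (k : Nat),
    (PySem.List.pyRange 1 ((k : Int) + 1) 1).foldl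
      (fun (s : Int × Int) j =>
        (min s.1 (PySem.List.pyGetD D j 0),
         min s.2 (min s.1 (PySem.List.pyGetD D j 0) + PySem.List.pyGetD R j 0)))
      (PySem.List.pyGetD D 0 0, PySem.List.pyGetD D 0 0 + PySem.List.pyGetD R 0 0)
      = (preMin D k, bMin D R k) := by
  intro k
  induction k with
  | zero =>
    rw [PySem.List.pyRange_one_eq_nil (by norm_num)]
    simp [preMin, bMin, PySem.List.pyGetD_zero, List.getD_eq_getElem?_getD]
  | succ k ih =>
    rw [PySem.List.pyRange_one_succ_right (show (1 : Int) ≤ ((k + 1 : Nat) : Int) by push_cast; omega), List.foldl_append]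
    have hcast : ((k + 1 : Nat) : Int) = (k : Int) + 1 := by push_cast; ring
    rw [hcast, ih]
    simp only [List.foldl_cons, List.foldl_nil, ← hcast, PySem.List.pyGetD_natCast]
    simp [preMin, bMin]

-- sufMin is a lower bound of R on i..j
theorem sufMin_le (R : List Int) (n : Nat) :
    ∀ d i j, i ≤ j → j < n → j = i + d → sufMin R n i ≤ R.getD j 0 := by
  intro d
  induction d with
  | zero =>
    intro i j _ hj hd
    have hji : j = i := by omega
    rw [hji]
    by_cases h : i + 1 < n
    · rw [sufMin_step R n i h]; exact min_le_right _ _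
    · rw [sufMin]; simp only [dif_neg h]; exact le_refl _
  | succ d ih =>
    intro i j hij hj hd
    have h1 : i + 1 < n := by omega
    rw [sufMin_step R n i h1]
    exact le_trans (min_le_left _ _) (ih (i + 1) j (by omega) hj (by omega))

-- sufMin is attained at some index i ≤ j < n
theorem sufMin_mem (R : List Int) (n : Nat) :
    ∀ d i, i < n → n - 1 - i = d → ∃ j, i ≤ j ∧ j < n ∧ sufMin R n i = R.getD j 0 := by
  intro d
  induction d with
  | zero =>
    intro i hi hd
    refine ⟨i, le_refl i, hi, ?_⟩
    rw [sufMin]; simp only [dif_neg (by omega : ¬ (i + 1 < n))]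
  | succ d ih =>
    intro i hi hd
    have h1 : i + 1 < n := by omega
    rw [sufMin_step R n i h1]
    rcases le_total (sufMin R n (i + 1)) (R.getD i 0) with h | h
    · obtain ⟨j, hij, hjn, hjv⟩ := ih (i + 1) h1 (by omega)
      exact ⟨j, by omega, hjn, by rw [min_eq_left h, hjv]⟩
    · exact ⟨i, le_refl i, hi, min_eq_right h⟩

theorem preMin_le (D : List Int) : ∀ k i, i ≤ k → preMin D k ≤ D.getD i 0 := by
  intro k
  induction k with
  | zero => intro i hi; interval_cases i; simp [preMin]
  | succ k ih =>
    intro i hi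
    rcases Nat.lt_or_ge i (k + 1) with h | h
    · exact le_trans (min_le_left _ _) (ih i (by omega))
    · have : i = k + 1 := by omega
      subst this
      exact min_le_right _ _

theorem preMin_mem (D : List Int) : ∀ k, ∃ i, i ≤ k ∧ preMin D k = D.getD i 0 := by
  intro k
  induction k with
  | zero => exact ⟨0, le_refl 0, rfl⟩
  | succ k ih =>
    obtain ⟨i, hi, hv⟩ := ih
    rcases le_total (preMin D k) (D.getD (k + 1) 0) with h | h
    · exact ⟨i, by omega, by rw [preMin, min_eq_left h, hv]⟩
    · exact ⟨k + 1, le_refl _, by rw [preMin, min_eq_right h]⟩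

theorem ascMin_le (D R : List Int) (n : Nat) :
    ∀ k i, i ≤ k → ascMin D R n k ≤ D.getD i 0 + sufMin R n i := by
  intro k
  induction k with
  | zero => intro i hi; interval_cases i; simp [ascMin]
  | succ k ih =>
    intro i hi
    rcases Nat.lt_or_ge i (k + 1) with h | h
    · exact le_trans (min_le_left _ _) (ih i (by omega))
    · have : i = k + 1 := by omega
      subst this
      exact min_le_right _ _

theorem ascMin_mem (D R : List Int) (n : Nat) :
    ∀ k, ∃ i, i ≤ k ∧ ascMin D R n k = D.getD i 0 + sufMin R n i := by
  intro k
  induction k with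
  | zero => exact ⟨0, le_refl 0, rfl⟩
  | succ k ih =>
    obtain ⟨i, hi, hv⟩ := ih
    rcases le_total (ascMin D R n k) (D.getD (k + 1) 0 + sufMin R n (k + 1)) with h | h
    · exact ⟨i, by omega, by rw [ascMin, min_eq_left h, hv]⟩
    · exact ⟨k + 1, le_refl _, by rw [ascMin, min_eq_right h]⟩

theorem bMin_le (D R : List Int) :
    ∀ k j, j ≤ k → bMin D R k ≤ preMin D j + R.getD j 0 := by
  intro k
  induction k with
  | zero => intro j hj; interval_cases j; simp [bMin, preMin]
  | succ k ih =>
    intro j hj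
    rcases Nat.lt_or_ge j (k + 1) with h | h
    · exact le_trans (min_le_left _ _) (ih j (by omega))
    · have : j = k + 1 := by omega
      subst this
      exact min_le_right _ _

theorem bMin_mem (D R : List Int) :
    ∀ k, ∃ j, j ≤ k ∧ bMin D R k = preMin D j + R.getD j 0 := by
  intro k
  induction k with
  | zero => exact ⟨0, le_refl 0, by simp [bMin, preMin]⟩
  | succ k ih =>
    obtain ⟨j, hj, hv⟩ := ih
    rcases le_total (bMin D R k) (preMin D (k + 1) + R.getD (k + 1) 0) with h | h
    · exact ⟨j, by omega, by rw [bMin, min_eq_left h, hv]⟩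
    · exact ⟨k + 1, le_refl _, by rw [bMin, min_eq_right h]⟩

-- min exchange: A's result = B's result at the final index
theorem asc_eq_b (D R : List Int) (n : Nat) (hn : 1 ≤ n) :
    ascMin D R n (n - 1) = bMin D R (n - 1) := by
  apply le_antisymm
  · obtain ⟨j, hj, hb⟩ := bMin_mem D R (n - 1)
    obtain ⟨i, hi, hp⟩ := preMin_mem D j
    have h1 : ascMin D R n (n - 1) ≤ D.getD i 0 + sufMin R n i :=
      ascMin_le D R n (n - 1) i (by omega)
    have h2 : sufMin R n i ≤ R.getD j 0 :=
      sufMin_le R n (j - i) i j hi (by omega) (by omega)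
    rw [hb, hp]
    omega
  · obtain ⟨i, hi, ha⟩ := ascMin_mem D R n (n - 1)
    obtain ⟨j, hij, hjn, hs⟩ := sufMin_mem R n (n - 1 - i) i (by omega) rfl
    have h1 : bMin D R (n - 1) ≤ preMin D j + R.getD j 0 :=
      bMin_le D R (n - 1) j (by omega)
    have h2 : preMin D j ≤ D.getD i 0 := preMin_le D j i hij
    rw [ha, hs]
    omega

theorem main_eq (D R : List Int) (hD : D ≠ []) :
    find_min_travel_distance D R = find_min_travel_distance_alt D R := by
  simp only [find_min_travel_distance, find_min_travel_distance_alt]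
  set n := D.length with hn
  have hn1 : 1 ≤ n := by
    have := List.length_pos_iff.mpr hD
    omega
  -- B's side reduces to bMin
  have hcastn : (n : Int) = ((n - 1 : Nat) : Int) + 1 := by omega
  have hB : ((PySem.List.pyRange 1 (n : Int) 1).foldl
      (fun (s : Int × Int) j =>
        (min s.1 (PySem.List.pyGetD D j 0),
         min s.2 (min s.1 (PySem.List.pyGetD D j 0) + PySem.List.pyGetD R j 0)))
      (PySem.List.pyGetD D 0 0, PySem.List.pyGetD D 0 0 + PySem.List.pyGetD R 0 0)).2
      = bMin D R (n - 1) := by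
    rw [hcastn]
    exact congrArg Prod.snd (passB D R (n - 1))
  -- A's side reduces to ascMin
  have hcast1 : (n : Int) - 1 = ((n - 1 : Nat) : Int) := by omega
  rw [hcast1, PySem.List.pySetD_natCast, PySem.List.pyGetD_natCast]
  rcases Nat.lt_or_ge n 2 with hn2 | hn2
  · -- n = 1 : both loops are empty
    have hne : n = 1 := by omega
    rw [hne] at hB ⊢
    rw [PySem.List.pyRange_neg_one_eq_nil (by norm_num),
      PySem.List.pyRange_one_eq_nil (by norm_num)]
    rw [PySem.List.pyRange_one_eq_nil (by norm_num)] at hB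
    simp only [List.foldl_nil] at hB ⊢
    rw [hB]
    simp [bMin, PySem.List.pyGetD_zero, List.getD_eq_getElem?_getD]
  · -- n ≥ 2
    have hcast2 : (n : Int) - 2 = ((n - 2 : Nat) : Int) := by omega
    rw [hcast2]
    set m0 := (List.replicate n (-1 : Int)).set (n - 1) (R.getD (n - 1) 0) with hm0
    have hlen0 : m0.length = n := by simp [hm0]
    have hinv0 : ∀ j, n - 2 < j → j < n → m0.getD j 0 = sufMin R n j := by
      intro j h1 h2
      have hj : j = n - 1 := by omega
      subst hj
      rw [hm0, List.getD_eq_getElem?_getD, List.getElem?_set_self (by simp; omega),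
        Option.getD_some, sufMin_last]
    obtain ⟨hlenM, hM⟩ := fillA R n (n - 2) m0 hlen0 (by omega) hinv0
    set M := (PySem.List.pyRange ((n - 2 : Nat) : Int) (-1) (-1)).foldl
      (fun m i => PySem.List.pySetD m i
        (min (PySem.List.pyGetD m (i + 1) 0) (PySem.List.pyGetD R i 0))) m0 with hMdef
    have hA : (PySem.List.pyRange 1 (n : Int) 1).foldl
        (fun t i => min t (PySem.List.pyGetD D i 0 + PySem.List.pyGetD M i 0))
        (PySem.List.pyGetD D 0 0 + PySem.List.pyGetD M 0 0) = ascMin D R n (n - 1) := by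
      rw [hcastn]
      exact passA D R M n hM (n - 1) (by omega)
    rw [hA, hB]
    exact asc_eq_b D R n hn1

-- ===== VERDICT (by name: the statement is the Claim_ definition above) =====
theorem find_min_travel_distance_spec : Claim_equal_find_min_travel_distance := by
  intro D R _ hpre
  unfold Spec_find_min_travel_distance
  exact main_eq D R hpre.1
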